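-- pv_equiv track=rewrite | github.com/Vishal-Devre/NeuraShield-Frontend | backend/main.py | country_from_place
-- ===== SOURCE A (Python) =====
-- def country_from_place(place: str) -> str:
--     if not place:
--         return "Global"
--
--     normalized = place.strip()
--     manual_matches = {
--         "hawaii": "United States of America",
--         "alaska": "United States of America",
--         "california": "United States of America",
--         "nebraska": "United States of America",
--         "michigan": "United States of America",
--         "oklahoma": "United States of America",
--         "indiana": "United States of America",
--         "taiwan": "Taiwan",
--         "japan": "Japan",
--         "philippines": "Philippines",
--         "indonesia": "Indonesia",
--         "india": "India",
--         "kenya": "Kenya",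
--         "ethiopia": "Ethiopia",
--         "tanzania": "Tanzania",
--         "chile": "Chile",
--         "turkey": "Turkey",
--         "pakistan": "Pakistan",
--         "bangladesh": "Bangladesh",
--         "mexico": "Mexico",
--         "peru": "Peru",
--         "china": "China",
--         "iceland": "Iceland",
--         "myanmar": "Myanmar",
--         "papua new guinea": "Papua New Guinea",
--         "vanuatu": "Vanuatu",
--         "afghanistan": "Afghanistan",
--         "nepal": "Nepal",
--         "italy": "Italy",
--         "greece": "Greece",
--         "ecuador": "Ecuador",
--         "new zealand": "New Zealand",
--         "usa": "United States of America",
--         "u.s.": "United States of America",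
--         "united states": "United States of America",
--     }
--
--     lowered = normalized.lower()
--     for key, country in manual_matches.items():
--         if key in lowered:
--             return country
--
--     if " of " in normalized:
--         tail = normalized.split(" of ")[-1].strip()
--         return country_from_place(tail)
--
--     if "," in normalized:
--         tail = normalized.split(",")[-1].strip()
--         return country_from_place(tail)
--
--     return normalized
-- ===== SOURCE B (Python) =====
-- MANUAL_MATCHES = {
--     "hawaii": "United States of America",
--     "alaska": "United States of America",
--     "california": "United States of America",
--     "nebraska": "United States of America",
--     "michigan": "United States of America",
--     "oklahoma": "United States of America",
--     "indiana": "United States of America",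
--     "taiwan": "Taiwan",
--     "japan": "Japan",
--     "philippines": "Philippines",
--     "indonesia": "Indonesia",
--     "india": "India",
--     "kenya": "Kenya",
--     "ethiopia": "Ethiopia",
--     "tanzania": "Tanzania",
--     "chile": "Chile",
--     "turkey": "Turkey",
--     "pakistan": "Pakistan",
--     "bangladesh": "Bangladesh",
--     "mexico": "Mexico",
--     "peru": "Peru",
--     "china": "China",
--     "iceland": "Iceland",
--     "myanmar": "Myanmar",
--     "papua new guinea": "Papua New Guinea",
--     "vanuatu": "Vanuatu",
--     "afghanistan": "Afghanistan",
--     "nepal": "Nepal",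
--     "italy": "Italy",
--     "greece": "Greece",
--     "ecuador": "Ecuador",
--     "new zealand": "New Zealand",
--     "usa": "United States of America",
--     "u.s.": "United States of America",
--     "united states": "United States of America",
-- }
--
--
-- def country_from_place(place: str) -> str:
--     if not place:
--         return "Global"
--     s = place.strip()
--     lowered = s.lower()
--     # One dictionary pass suffices: every later candidate is a substring of s,
--     # so if no key occurs in lowered now, none can occur later either.
--     for key, country in MANUAL_MATCHES.items():
--         if key in lowered:
--             return country
--     while True:
--         if " of " in s:
--             s = s.split(" of ")[-1].strip()
--         elif "," in s:
--             s = s.split(",")[-1].strip()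
--         else:
--             return s
--         if not s:
--             return "Global"
-- ===== Notes on version B (the rewrite author's own statement) =====
-- stated objective: simpler
-- what changed: B runs the substring dictionary pass only once on the stripped input (every peeled tail is a substring of it, so a failed first pass can never match later) and replaces A's tail recursion with a plain iterative peeling loop.
import Mathlib
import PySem

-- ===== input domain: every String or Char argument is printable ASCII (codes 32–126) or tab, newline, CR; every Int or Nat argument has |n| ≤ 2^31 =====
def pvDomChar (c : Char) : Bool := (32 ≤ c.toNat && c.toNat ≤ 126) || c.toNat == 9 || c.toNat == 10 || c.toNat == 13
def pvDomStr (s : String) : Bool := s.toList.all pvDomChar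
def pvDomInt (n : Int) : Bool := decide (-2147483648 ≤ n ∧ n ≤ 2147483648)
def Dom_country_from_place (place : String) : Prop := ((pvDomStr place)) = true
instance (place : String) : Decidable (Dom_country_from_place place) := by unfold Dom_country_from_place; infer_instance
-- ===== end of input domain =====

-- B matches the country table against the input ONCE (every later tail is a substring of the
-- stripped input, so a failed first pass can never succeed later) and then peels " of "/","
-- tails in a plain loop; same return value as A everywhere (idiomatic/simpler objective).

-- ===== PORT A =====
def manualMatchesA : List (String × String) :=
  [("hawaii", "United States of America"),
   ("alaska", "United States of America"),
   ("california", "United States of America"),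
   ("nebraska", "United States of America"),
   ("michigan", "United States of America"),
   ("oklahoma", "United States of America"),
   ("indiana", "United States of America"),
   ("taiwan", "Taiwan"),
   ("japan", "Japan"),
   ("philippines", "Philippines"),
   ("indonesia", "Indonesia"),
   ("india", "India"),
   ("kenya", "Kenya"),
   ("ethiopia", "Ethiopia"),
   ("tanzania", "Tanzania"),
   ("chile", "Chile"),
   ("turkey", "Turkey"),
   ("pakistan", "Pakistan"),
   ("bangladesh", "Bangladesh"),
   ("mexico", "Mexico"),
   ("peru", "Peru"),
   ("china", "China"),
   ("iceland", "Iceland"),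
   ("myanmar", "Myanmar"),
   ("papua new guinea", "Papua New Guinea"),
   ("vanuatu", "Vanuatu"),
   ("afghanistan", "Afghanistan"),
   ("nepal", "Nepal"),
   ("italy", "Italy"),
   ("greece", "Greece"),
   ("ecuador", "Ecuador"),
   ("new zealand", "New Zealand"),
   ("usa", "United States of America"),
   ("u.s.", "United States of America"),
   ("united states", "United States of America")]

-- A's `for key, country in manual_matches.items(): if key in lowered: return country`
def matchLoopA : List (String × String) → String → Option String
  | [], _ => none
  | (key, country) :: rest, lowered =>
      if PySem.Str.isIn key lowered then some country else matchLoopA rest lowered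

-- A's recursion, with a fuel guard for totality (the recursed-on tail is strictly shorter
-- than the argument, so fuel `len place + 1` is never exhausted).
def cfpAuxA : Nat → String → String
  | 0, _ => ""
  | n + 1, place =>
      if place = "" then "Global"
      else
        let normalized := PySem.Str.strip place
        let lowered := PySem.Str.lower normalized
        match matchLoopA manualMatchesA lowered with
        | some country => country
        | none =>
            if PySem.Str.isIn " of " normalized then
              cfpAuxA n (PySem.Str.strip (((PySem.Str.split? normalized " of ").getD []).getLastD ""))
            else if PySem.Str.isIn "," normalized then
              cfpAuxA n (PySem.Str.strip (((PySem.Str.split? normalized ",").getD []).getLastD ""))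
            else normalized

def country_from_place (place : String) : String :=
  cfpAuxA (place.toList.length + 1) place

-- ===== PORT B =====
def manualMatchesB : List (String × String) := manualMatchesA

-- B's `while True` tail-peeling loop, with a fuel guard for totality (each peel shortens s).
def tailLoopB : Nat → String → String
  | 0, _ => ""
  | n + 1, s =>
      if PySem.Str.isIn " of " s then
        let t := PySem.Str.strip (((PySem.Str.split? s " of ").getD []).getLastD "")
        if t = "" then "Global" else tailLoopB n t
      else if PySem.Str.isIn "," s then
        let t := PySem.Str.strip (((PySem.Str.split? s ",").getD []).getLastD "")
        if t = "" then "Global" else tailLoopB n t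
      else s

def country_from_place_alt (place : String) : String :=
  if place = "" then "Global"
  else
    let s := PySem.Str.strip place
    let lowered := PySem.Str.lower s
    match manualMatchesB.find? (fun kv => PySem.Str.isIn kv.1 lowered) with
    | some kv => kv.2
    | none => tailLoopB (s.toList.length + 1) s

-- ===== PRECONDITION & SPEC =====
def Spec_country_from_place (place : String) (out : String) : Prop := out = country_from_place_alt place
instance (place : String) (out : String) : Decidable (Spec_country_from_place place out) := by unfold Spec_country_from_place; infer_instance

-- ===== CLAIM (what is proved, stated in full; the proofs are below) =====
def Claim_equal_country_from_place : Prop := ∀ (place : String), Dom_country_from_place place → Spec_country_from_place place (country_from_place place)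

-- ===== LEMMAS AND PROOFS =====

theorem matchesB_eq : manualMatchesB = manualMatchesA := rfl

-- A's match loop is `find? … |>.map (·.2)`
theorem matchLoopA_eq_find? (ms : List (String × String)) (lowered : String) :
    matchLoopA ms lowered = (ms.find? (fun kv => PySem.Str.isIn kv.1 lowered)).map Prod.snd := by
  induction ms with
  | nil => rfl
  | cons kv rest ih =>
      obtain ⟨k, c⟩ := kv
      simp only [matchLoopA, List.find?]
      cases h : PySem.Chars.isIn k.toList lowered.toList with
      | true => simp [PySem.Str.isIn, h]
      | false => simp [PySem.Str.isIn, h, ih]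

theorem lstrip_suffix (l : List Char) : PySem.Chars.lstrip l <:+ l := List.dropWhile_suffix _

theorem rstrip_prefix (l : List Char) : PySem.Chars.rstrip l <+: l := by
  unfold PySem.Chars.rstrip
  have h := List.dropWhile_suffix (l := l.reverse) PySem.Chars.isspace
  rw [← List.reverse_suffix]
  simpa using h

theorem strip_infix (l : List Char) : PySem.Chars.strip l <:+: l := by
  unfold PySem.Chars.strip
  exact ((rstrip_prefix (PySem.Chars.lstrip l)).isInfix).trans (lstrip_suffix l).isInfix

theorem strip_length_le (l : List Char) : (PySem.Chars.strip l).length ≤ l.length :=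
  (strip_infix l).length_le

theorem lstrip_eq_self_of_prefix {l m : List Char} (hm : m <+: l)
    (hl : PySem.Chars.lstrip l = l) : PySem.Chars.lstrip m = m := by
  unfold PySem.Chars.lstrip at *
  cases m with
  | nil => rfl
  | cons a t =>
      cases l with
      | nil => simp at hm
      | cons b u =>
          obtain ⟨hab, -⟩ := List.cons_prefix_cons.mp hm
          subst hab
          rw [List.dropWhile_cons] at hl ⊢
          by_cases hb : PySem.Chars.isspace a
          · rw [if_pos hb] at hl
            exfalso
            have h3 := congrArg List.length hl
            have h4 := List.length_dropWhile_le (p := PySem.Chars.isspace) (l := u)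
            simp at h3; omega
          · rw [if_neg hb]

theorem strip_idem (l : List Char) : PySem.Chars.strip (PySem.Chars.strip l) = PySem.Chars.strip l := by
  unfold PySem.Chars.strip
  have h1 : PySem.Chars.lstrip (PySem.Chars.lstrip l) = PySem.Chars.lstrip l :=
    List.dropWhile_idempotent _ _
  have h2 : PySem.Chars.lstrip (PySem.Chars.rstrip (PySem.Chars.lstrip l)) =
      PySem.Chars.rstrip (PySem.Chars.lstrip l) :=
    lstrip_eq_self_of_prefix (rstrip_prefix _) h1
  rw [h2]
  unfold PySem.Chars.rstrip
  simp [List.dropWhile_idempotent]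

-- the last piece produced by splitOn.go: a suffix, shorter by |sep| when sep occurs
theorem splitOn_go_last (sep : List Char) (hsep : sep ≠ []) :
    ∀ (fuel : Nat) (l cur : List Char) (accs : List (List Char)), l.length < fuel →
      ((sep <:+: l → ∃ t, (PySem.Chars.splitOn.go sep fuel l cur accs).getLastD [] = t ∧
          t <:+ l ∧ t.length + sep.length ≤ l.length) ∧
       (¬ sep <:+: l → (PySem.Chars.splitOn.go sep fuel l cur accs).getLastD [] = cur.reverse ++ l)) := by
  intro fuel
  induction fuel with
  | zero => intro l cur accs h; omega
  | succ n ih =>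
      intro l cur accs hlen
      cases l with
      | nil =>
          constructor
          · intro hin; exact absurd (List.eq_nil_of_infix_nil hin) hsep
          · intro _; simp [PySem.Chars.splitOn.go]
      | cons c rest =>
          rw [show PySem.Chars.splitOn.go sep (n+1) (c :: rest) cur accs =
              (if sep.isPrefixOf (c :: rest) then
                 PySem.Chars.splitOn.go sep n (List.drop sep.length (c :: rest)) [] (cur.reverse :: accs)
               else PySem.Chars.splitOn.go sep n rest (c :: cur) accs) from rfl]
          by_cases hp : sep.isPrefixOf (c :: rest)
          · rw [if_pos hp]
            have hpre : sep <+: c :: rest := List.isPrefixOf_iff_prefix.mp hp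
            have hslen : 0 < sep.length := List.length_pos_of_ne_nil hsep
            have hdlen : (List.drop sep.length (c :: rest)).length = (c :: rest).length - sep.length :=
              List.length_drop ..
            have hslelen : sep.length ≤ (c :: rest).length := hpre.length_le
            have hlt : (List.drop sep.length (c :: rest)).length < n := by omega
            have hiha := ih (List.drop sep.length (c :: rest)) [] (cur.reverse :: accs) hlt
            constructor
            · intro _
              by_cases hin' : sep <:+: List.drop sep.length (c :: rest)
              · obtain ⟨t, ht, hsuf, hlen2⟩ := hiha.1 hin'
                exact ⟨t, ht, hsuf.trans (List.drop_suffix _ _), by omega⟩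
              · refine ⟨_, hiha.2 hin', by simpa using List.drop_suffix sep.length (c :: rest),
                  by simp only [List.reverse_nil, List.nil_append]; omega⟩
            · intro hnin; exact absurd hpre.isInfix hnin
          · rw [if_neg hp]
            have hlt : rest.length < n := by simp at hlen; omega
            obtain ⟨ih1, ih2⟩ := ih rest (c :: cur) accs hlt
            constructor
            · intro hin
              rcases List.infix_cons_iff.mp hin with hpre | hinf
              · exact absurd (List.isPrefixOf_iff_prefix.mpr hpre) hp
              · obtain ⟨t, ht, hsuf, hlen2⟩ := ih1 hinf
                exact ⟨t, ht, hsuf.trans (List.suffix_cons c rest), by simp; omega⟩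
            · intro hnin
              have hninr : ¬ sep <:+: rest := fun h => hnin (List.infix_cons_iff.mpr (Or.inr h))
              rw [ih2 hninr]; simp

theorem splitOn_last (s sep : List Char) (hsep : sep ≠ []) (h : sep <:+: s) :
    ∃ t, (PySem.Chars.splitOn s sep).getLastD [] = t ∧ t <:+ s ∧ t.length + sep.length ≤ s.length := by
  have := (splitOn_go_last sep hsep (s.length + 1) s [] [] (by omega)).1 h
  exact this

-- the string-level tail expression used in both ports, moved to the Chars level
theorem tail_toList (s sep : String) (hsep : sep.toList ≠ []) :
    (PySem.Str.strip (((PySem.Str.split? s sep).getD []).getLastD "")).toList =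
      PySem.Chars.strip ((PySem.Chars.splitOn s.toList sep.toList).getLastD []) := by
  rw [PySem.Str.toList_strip]
  congr 1
  unfold PySem.Str.split? PySem.Chars.split?
  rw [if_neg (by simpa using hsep)]
  simp only [Option.map_some, Option.getD_some]
  rw [List.getLastD_eq_getLast?, List.getLastD_eq_getLast?, List.getLast?_map]
  cases (PySem.Chars.splitOn s.toList sep.toList).getLast? with
  | none => rfl
  | some x => simp

-- properties of the peeled tail: stripped, an infix, and |sep| shorter
theorem tail_spec (s sep : String) (hsep : sep.toList ≠ []) (hin : sep.toList <:+: s.toList) :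
    PySem.Str.strip (PySem.Str.strip (((PySem.Str.split? s sep).getD []).getLastD "")) =
        PySem.Str.strip (((PySem.Str.split? s sep).getD []).getLastD "") ∧
      (PySem.Str.strip (((PySem.Str.split? s sep).getD []).getLastD "")).toList <:+: s.toList ∧
      (PySem.Str.strip (((PySem.Str.split? s sep).getD []).getLastD "")).toList.length + sep.toList.length
        ≤ s.toList.length := by
  obtain ⟨L, hL, hsuf, hlen⟩ := splitOn_last s.toList sep.toList hsep hin
  have ht : (PySem.Str.strip (((PySem.Str.split? s sep).getD []).getLastD "")).toList =
      PySem.Chars.strip L := by rw [tail_toList s sep hsep, hL]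
  refine ⟨?_, ?_, ?_⟩
  · apply String.toList_inj.mp
    rw [PySem.Str.toList_strip, ht, strip_idem]
  · rw [ht]; exact (strip_infix L).trans hsuf.isInfix
  · rw [ht]
    have := strip_length_le L
    omega

-- a key that does not occur in lower s₀ does not occur in lower t for t an infix of s₀
theorem isIn_lower_mono {k t s₀ : List Char} (h : t <:+: s₀)
    (hno : PySem.Chars.isIn k (PySem.Chars.lower s₀) = false) :
    PySem.Chars.isIn k (PySem.Chars.lower t) = false := by
  rw [PySem.Chars.isIn_eq_false_iff] at hno ⊢
  intro hk
  exact hno (hk.trans (by unfold PySem.Chars.lower; exact h.map _))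

-- A's dictionary pass fails on every infix of s₀ once it fails on s₀ itself
theorem matchLoopA_none_of_infix {s₀ : List Char} {t : String}
    (hno : ∀ kv ∈ manualMatchesA, PySem.Chars.isIn kv.1.toList (PySem.Chars.lower s₀) = false)
    (hinf : t.toList <:+: s₀) :
    matchLoopA manualMatchesA (PySem.Str.lower t) = none := by
  rw [matchLoopA_eq_find?, List.find?_eq_none.mpr, Option.map_none]
  intro kv hkv
  have : PySem.Str.isIn kv.1 (PySem.Str.lower t) =
      PySem.Chars.isIn kv.1.toList (PySem.Chars.lower t.toList) := by
    unfold PySem.Str.isIn; rw [PySem.Str.toList_lower]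
  simp only [this, isIn_lower_mono hinf (hno kv hkv)]
  simp

-- tailLoopB does not depend on its fuel once the fuel exceeds the string length
theorem tailLoopB_fuel : ∀ (n m : Nat) (t : String), t.toList.length < n → t.toList.length < m →
    tailLoopB n t = tailLoopB m t := by
  intro n
  induction n with
  | zero => intro m t h _; omega
  | succ n ih =>
      intro m t hn hm
      cases m with
      | zero => omega
      | succ m =>
          simp only [tailLoopB]
          by_cases hof : PySem.Str.isIn " of " t
          · rw [if_pos hof, if_pos hof]
            have hin : (" of ").toList <:+: t.toList := (PySem.Chars.isIn_iff_infix _ _).mp hof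
            obtain ⟨-, -, hlen⟩ := tail_spec t " of " (by decide) hin
            have h4 : ((" of ").toList).length = 4 := by decide
            split
            · rfl
            · exact ih m _ (by omega) (by omega)
          · rw [if_neg hof, if_neg hof]
            by_cases hc : PySem.Str.isIn "," t
            · rw [if_pos hc, if_pos hc]
              have hin : (",").toList <:+: t.toList := (PySem.Chars.isIn_iff_infix _ _).mp hc
              obtain ⟨-, -, hlen⟩ := tail_spec t "," (by decide) hin
              have h1 : ((",").toList).length = 1 := by decide
              split
              · rfl
              · exact ih m _ (by omega) (by omega)
            · rw [if_neg hc, if_neg hc]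

-- the heart of the proof: once the dictionary pass has failed on s₀, A's recursion on any
-- stripped infix t of s₀ is exactly B's tail-peeling loop on t (behind A's empty guard)
theorem main_loop (s₀ : List Char)
    (hno : ∀ kv ∈ manualMatchesA, PySem.Chars.isIn kv.1.toList (PySem.Chars.lower s₀) = false) :
    ∀ (n : Nat) (t : String), PySem.Str.strip t = t → t.toList <:+: s₀ → t.toList.length ≤ n →
      cfpAuxA (n + 1) t = (if t = "" then "Global" else tailLoopB (n + 1) t) := by
  intro n
  induction n using Nat.strong_induction_on with
  | _ n ih =>
      intro t hstrip hinf hlen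
      by_cases ht : t = ""
      · simp [cfpAuxA, ht]
      · rw [if_neg ht]
        simp only [cfpAuxA, if_neg ht, hstrip, matchLoopA_none_of_infix hno hinf]
        simp only [tailLoopB]
        by_cases hof : PySem.Str.isIn " of " t
        · rw [if_pos hof, if_pos hof]
          have hin : (" of ").toList <:+: t.toList := (PySem.Chars.isIn_iff_infix _ _).mp hof
          obtain ⟨hs1, hs2, hs3⟩ := tail_spec t " of " (by decide) hin
          have h4 : ((" of ").toList).length = 4 := by decide
          cases n with
          | zero => omega
          | succ m =>
              exact ih m (by omega) _ hs1 (hs2.trans hinf) (by omega)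
        · rw [if_neg hof, if_neg hof]
          by_cases hc : PySem.Str.isIn "," t
          · rw [if_pos hc, if_pos hc]
            have hin : (",").toList <:+: t.toList := (PySem.Chars.isIn_iff_infix _ _).mp hc
            obtain ⟨hs1, hs2, hs3⟩ := tail_spec t "," (by decide) hin
            have h1 : ((",").toList).length = 1 := by decide
            cases n with
            | zero => omega
            | succ m =>
                exact ih m (by omega) _ hs1 (hs2.trans hinf) (by omega)
          · rw [if_neg hc, if_neg hc]

-- ===== VERDICT (by name: the statement is the Claim_ definition above) =====
theorem country_from_place_spec : Claim_equal_country_from_place := by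
  intro place _
  unfold Spec_country_from_place country_from_place country_from_place_alt
  by_cases hp : place = ""
  · subst hp; rfl
  · rw [if_neg hp]
    simp only [cfpAuxA, if_neg hp, matchesB_eq]
    set s : String := PySem.Str.strip place with hs
    have hsl : s.toList = PySem.Chars.strip place.toList := PySem.Str.toList_strip place
    have hslen : s.toList.length ≤ place.toList.length := by
      rw [hsl]; exact strip_length_le _
    have hsstrip : PySem.Str.strip s = s := by
      apply String.toList_inj.mp
      rw [PySem.Str.toList_strip, hsl, strip_idem]
    rw [matchLoopA_eq_find?]
    cases hfind : manualMatchesA.find? (fun kv => PySem.Str.isIn kv.1 (PySem.Str.lower s)) with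
    | some kv => simp
    | none =>
        simp only [Option.map_none]
        have hno : ∀ kv ∈ manualMatchesA,
            PySem.Chars.isIn kv.1.toList (PySem.Chars.lower s.toList) = false := by
          intro kv hkv
          have := List.find?_eq_none.mp hfind kv hkv
          have heq : PySem.Str.isIn kv.1 (PySem.Str.lower s) =
              PySem.Chars.isIn kv.1.toList (PySem.Chars.lower s.toList) := by
            unfold PySem.Str.isIn; rw [PySem.Str.toList_lower]
          rw [← heq]; simpa using this
        set L : Nat := place.toList.length with hL
        simp only [tailLoopB]
        by_cases hof : PySem.Str.isIn " of " s
        · rw [if_pos hof, if_pos hof]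
          have hin : (" of ").toList <:+: s.toList := (PySem.Chars.isIn_iff_infix _ _).mp hof
          obtain ⟨hs1, hs2, hs3⟩ := tail_spec s " of " (by decide) hin
          have h4 : ((" of ").toList).length = 4 := by decide
          have hL4 : 4 ≤ L := by omega
          have hstep := main_loop s.toList hno (L - 1) _ hs1 hs2 (by omega)
          rw [show L = (L - 1) + 1 from by omega, hstep]
          split
          · rfl
          · exact tailLoopB_fuel ((L - 1) + 1) (s.toList.length) _ (by omega) (by omega)
        · rw [if_neg hof, if_neg hof]
          by_cases hc : PySem.Str.isIn "," s
          · rw [if_pos hc, if_pos hc]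
            have hin : (",").toList <:+: s.toList := (PySem.Chars.isIn_iff_infix _ _).mp hc
            obtain ⟨hs1, hs2, hs3⟩ := tail_spec s "," (by decide) hin
            have h1 : ((",").toList).length = 1 := by decide
            have hL1 : 1 ≤ L := by omega
            have hstep := main_loop s.toList hno (L - 1) _ hs1 hs2 (by omega)
            rw [show L = (L - 1) + 1 from by omega, hstep]
            split
            · rfl
            · exact tailLoopB_fuel ((L - 1) + 1) (s.toList.length) _ (by omega) (by omega)
          · rw [if_neg hc, if_neg hc]
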